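-- pv_equiv track=rewrite | github.com/JRod166/Music-Snippet-Extraction | chroma_exp.py | no_overlap
-- ===== SOURCE A (Python) =====
-- def no_overlap(data):
--     indeces=[]
--     for i in data:
--         for j in range (i[1][0],i[2][0]+1):
--             if j not in indeces:
--                 indeces.append(j)
--         for j in range (i[1][1],i[2][1]+1):
--             if j not in indeces:
--                 indeces.append(j)
--     return indeces
-- ===== SOURCE B (Python) =====
-- def _merge(cov, a, b):
--     res = []
--     placed = False
--     for (lo, hi) in cov:
--         if hi < a - 1:
--             res.append((lo, hi))
--         elif lo > b + 1:
--             if not placed: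
--                 res.append((a, b))
--                 placed = True
--             res.append((lo, hi))
--         else:
--             a = min(a, lo)
--             b = max(b, hi)
--     if not placed:
--         res.append((a, b))
--     return res
--
--
-- def no_overlap(data):
--     out = []
--     cov = []  # sorted, disjoint, non-adjacent closed intervals covering exactly set(out)
--     for i in data:
--         for (a, b) in ((i[1][0], i[2][0]), (i[1][1], i[2][1])):
--             if a > b:
--                 continue
--             cur = a
--             for (lo, hi) in cov:
--                 if lo > b:
--                     break
--                 if hi < cur:
--                     continue
--                 if cur < lo:
--                     out.extend(range(cur, lo))
--                 cur = max(cur, hi + 1)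
--             if cur <= b:
--                 out.extend(range(cur, b + 1))
--             cov = _merge(cov, a, b)
--     return out
-- ===== Notes on version B (the rewrite author's own statement) =====
-- stated objective: faster
-- what changed: Replaces A's per-index 'j not in indeces' list scan by an interval-merging algorithm: B keeps the already-emitted indices as a sorted list of disjoint closed intervals and, for each incoming range, emits only its uncovered gaps in increasing order, then fuses the range into the interval list.
import Mathlib
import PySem

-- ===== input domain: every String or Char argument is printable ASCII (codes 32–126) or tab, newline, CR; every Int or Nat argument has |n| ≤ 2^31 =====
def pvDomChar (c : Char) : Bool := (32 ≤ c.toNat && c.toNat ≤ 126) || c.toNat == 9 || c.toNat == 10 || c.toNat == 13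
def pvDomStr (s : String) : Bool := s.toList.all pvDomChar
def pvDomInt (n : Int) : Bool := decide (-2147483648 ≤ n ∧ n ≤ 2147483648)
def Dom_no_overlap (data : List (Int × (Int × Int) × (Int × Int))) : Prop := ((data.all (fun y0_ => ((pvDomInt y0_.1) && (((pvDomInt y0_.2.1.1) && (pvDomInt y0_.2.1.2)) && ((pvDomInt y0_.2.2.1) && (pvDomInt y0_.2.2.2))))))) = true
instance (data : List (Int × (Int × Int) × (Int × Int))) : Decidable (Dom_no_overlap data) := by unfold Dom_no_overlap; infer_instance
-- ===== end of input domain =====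

-- B replaces A's per-index 'j not in indeces' list scan by an interval-merging algorithm:
-- it keeps the already-emitted indices as a sorted list of disjoint closed intervals and
-- emits, per incoming range, only the uncovered gaps (objective: alternative algorithm).

-- ===== PORT A =====
-- nested loops: for each i append the unseen elements of both ranges, in order
def no_overlap (data : List (Int × (Int × Int) × (Int × Int))) : List Int :=
  data.foldl
    (fun indeces i =>
      (PySem.List.pyRange i.2.1.2 (i.2.2.2 + 1) 1).foldl
        (fun acc j => if j ∈ acc then acc else acc ++ [j])
        ((PySem.List.pyRange i.2.1.1 (i.2.2.1 + 1) 1).foldl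
          (fun acc j => if j ∈ acc then acc else acc ++ [j]) indeces))
    []

-- ===== PORT B =====
-- _merge: insert closed interval [a,b] into the sorted, disjoint, non-adjacent interval
-- list, fusing everything that overlaps or touches it (loop of Source B's _merge)
def pvMergeGo (res : List (Int × Int)) (placed : Bool) (a b : Int) :
    List (Int × Int) → List (Int × Int)
  | [] => if placed then res else res ++ [(a, b)]
  | (lo, hi) :: t =>
      if hi < a - 1 then pvMergeGo (res ++ [(lo, hi)]) placed a b t
      else if lo > b + 1 then
        if placed then pvMergeGo (res ++ [(lo, hi)]) true a b t
        else pvMergeGo (res ++ [(a, b), (lo, hi)]) true a b t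
      else pvMergeGo res placed (min a lo) (max b hi) t

def pvMerge (cov : List (Int × Int)) (a b : Int) : List (Int × Int) :=
  pvMergeGo [] false a b cov

-- inner 'for (lo, hi) in cov' scan (with break): returns the final (cur, out)
def pvEmitGo (b cur : Int) (out : List Int) :
    List (Int × Int) → Int × List Int
  | [] => (cur, out)
  | (lo, hi) :: t =>
      if lo > b then (cur, out)
      else if hi < cur then pvEmitGo b cur out t
      else pvEmitGo b (max cur (hi + 1))
             (if cur < lo then out ++ PySem.List.pyRange cur lo 1 else out) t

-- body of the 'for (a, b) in (…, …)' loop; state st = (out, cov)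
def pvStepRange (st : List Int × List (Int × Int)) (a b : Int) :
    List Int × List (Int × Int) :=
  if a > b then st
  else
    let r := pvEmitGo b a st.1 st.2
    ((if r.1 ≤ b then r.2 ++ PySem.List.pyRange r.1 (b + 1) 1 else r.2),
     pvMerge st.2 a b)

def no_overlap_alt (data : List (Int × (Int × Int) × (Int × Int))) : List Int :=
  (data.foldl
    (fun st i => pvStepRange (pvStepRange st i.2.1.1 i.2.2.1) i.2.1.2 i.2.2.2)
    ([], [])).1

-- ===== PRECONDITION & SPEC =====
def Spec_no_overlap (data : List (Int × (Int × Int) × (Int × Int))) (out : List Int) : Prop := out = no_overlap_alt data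
instance (data : List (Int × (Int × Int) × (Int × Int))) (out : List Int) : Decidable (Spec_no_overlap data out) := by unfold Spec_no_overlap; infer_instance

-- ===== CLAIM (what is proved, stated in full; the proofs are below) =====
def Claim_equal_no_overlap : Prop := ∀ (data : List (Int × (Int × Int) × (Int × Int))), Dom_no_overlap data → Spec_no_overlap data (no_overlap data)

-- ===== LEMMAS AND PROOFS =====

-- j is covered by one of the intervals
def pvCovB (cov : List (Int × Int)) (j : Int) : Bool :=
  cov.any (fun p => decide (p.1 ≤ j ∧ j ≤ p.2))

-- cov is a sorted list of nonempty, pairwise disjoint, non-adjacent intervals, all starting ≥ m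
def pvOrd (m : Int) : List (Int × Int) → Prop
  | [] => True
  | (lo, hi) :: t => m ≤ lo ∧ lo ≤ hi ∧ pvOrd (hi + 2) t

theorem pvOrd_mono {m m' : Int} {l : List (Int × Int)} (h : pvOrd m' l) (hle : m ≤ m') :
    pvOrd m l := by
  cases l with
  | nil => trivial
  | cons p t =>
    obtain ⟨lo, hi⟩ := p
    obtain ⟨h1, h2, h3⟩ := h
    exact ⟨le_trans hle h1, h2, h3⟩

theorem pvCov_low {m j : Int} {l : List (Int × Int)} (h : pvOrd m l) (hj : j < m) :
    pvCovB l j = false := by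
  induction l generalizing m with
  | nil => rfl
  | cons p t ih =>
    obtain ⟨lo, hi⟩ := p
    obtain ⟨h1, h2, h3⟩ := h
    have ht : pvCovB t j = false := ih h3 (by omega)
    simp only [pvCovB, List.any_cons] at *
    rw [ht]
    simp; omega

-- A's one-range fold appends exactly the not-yet-present elements, in order
theorem pvFoldA (l : List Int) (s : List Int) (hnd : l.Nodup) :
    l.foldl (fun acc j => if j ∈ acc then acc else acc ++ [j]) s
      = s ++ l.filter (fun j => !decide (j ∈ s)) := by
  induction l generalizing s with
  | nil => simp
  | cons j t ih =>
    obtain ⟨hj, hnd'⟩ := List.nodup_cons.mp hnd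
    by_cases hjs : j ∈ s
    · simp [List.foldl_cons, hjs, ih _ hnd']
    · simp only [List.foldl_cons, if_neg hjs]
      rw [ih _ hnd']
      have he : t.filter (fun x => !decide (x ∈ s ++ [j])) = t.filter (fun x => !decide (x ∈ s)) := by
        apply List.filter_congr
        intro x hx
        have : x ≠ j := fun h => hj (h ▸ hx)
        simp [List.mem_append, this]
      rw [he]
      simp [hjs, List.append_assoc]

theorem pvMergeGo_res (res : List (Int × Int)) (placed : Bool) (a b : Int)
    (cov : List (Int × Int)) :
    pvMergeGo res placed a b cov = res ++ pvMergeGo [] placed a b cov := by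
  induction cov generalizing res placed a b with
  | nil => cases placed <;> simp [pvMergeGo]
  | cons p t ih =>
    obtain ⟨lo, hi⟩ := p
    simp only [pvMergeGo]
    split_ifs with h1 h2 h3
    · rw [ih, ih (([] : List (Int × Int)) ++ [(lo, hi)])]; simp
    · rw [ih, ih (([] : List (Int × Int)) ++ [(lo, hi)])]; simp
    · rw [ih, ih (([] : List (Int × Int)) ++ [(a, b), (lo, hi)])]; simp
    · rw [ih]

theorem pvMerge_true {m b : Int} (a : Int) {t : List (Int × Int)}
    (h : pvOrd m t) (hb : b + 1 < m) (hab : a ≤ b) :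
    pvMergeGo [] true a b t = t := by
  induction t generalizing m with
  | nil => rfl
  | cons p t ih =>
    obtain ⟨lo, hi⟩ := p
    obtain ⟨h1, h2, h3⟩ := h
    simp only [pvMergeGo]
    rw [if_neg (by omega : ¬ hi < a - 1), if_pos (by omega : lo > b + 1)]
    rw [pvMergeGo_res, ih h3 (by omega)]
    simp

theorem pvMerge_ok {m a b : Int} {cov : List (Int × Int)}
    (h : pvOrd m cov) (hab : a ≤ b) :
    pvOrd (min m a) (pvMerge cov a b) ∧
      ∀ j, pvCovB (pvMerge cov a b) j = (pvCovB cov j || decide (a ≤ j ∧ j ≤ b)) := by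
  induction cov generalizing m a b with
  | nil =>
    refine ⟨⟨min_le_right _ _, hab, trivial⟩, fun j => ?_⟩
    simp [pvMerge, pvMergeGo, pvCovB]
  | cons p t ih =>
    obtain ⟨lo, hi⟩ := p
    obtain ⟨h1, h2, h3⟩ := h
    simp only [pvMerge, pvMergeGo]
    by_cases hc1 : hi < a - 1
    · -- hi < a - 1 : keep (lo, hi), recurse into the tail
      rw [if_pos hc1, pvMergeGo_res]
      simp only [List.nil_append, List.singleton_append]
      obtain ⟨iho, ihc⟩ := ih h3 hab
      constructor
      · refine ⟨by omega, h2, ?_⟩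
        rw [min_eq_left (by omega : (hi + 2 : Int) ≤ a)] at iho
        exact iho
      · intro j
        have ihc' := ihc j
        simp only [pvCovB, List.any_cons, pvMerge] at ihc' ⊢
        rw [ihc', Bool.or_assoc]
    · rw [if_neg hc1]
      by_cases hc2 : lo > b + 1
      · -- lo > b + 1 : place (a, b) here, the rest is unchanged
        rw [if_pos hc2]
        simp only [Bool.false_eq_true, if_false]
        rw [pvMergeGo_res, pvMerge_true a h3 (by omega) hab]
        simp only [List.nil_append]
        constructor
        · exact ⟨by omega, hab, by omega, h2, h3⟩
        · intro j
          simp only [pvCovB, List.any_cons]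
          exact Bool.or_comm _ _
      · -- overlap or adjacency : absorb the interval into [a, b]
        rw [if_neg hc2]
        obtain ⟨iho, ihc⟩ := ih h3 (by omega : min a lo ≤ max b hi)
        constructor
        · exact pvOrd_mono iho (by omega)
        · intro j
          have ihc' := ihc j
          simp only [pvMerge] at ihc'
          rw [ihc']
          have hiff : (min a lo ≤ j ∧ j ≤ max b hi) ↔ ((lo ≤ j ∧ j ≤ hi) ∨ (a ≤ j ∧ j ≤ b)) := by
            omega
          rw [decide_eq_decide.mpr hiff, Bool.decide_or]
          simp only [pvCovB, List.any_cons]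
          cases t.any (fun p => decide (p.1 ≤ j ∧ j ≤ p.2)) <;>
            cases decide (lo ≤ j ∧ j ≤ hi) <;>
              cases decide (a ≤ j ∧ j ≤ b) <;> simp

-- filter (· < c) on a unit-step range
theorem pvFilter_lt (c : Int) : ∀ (n : Nat) (a b : Int), (b - a).toNat = n →
    (PySem.List.pyRange a b 1).filter (fun j => decide (j < c))
      = PySem.List.pyRange a (min c b) 1 := by
  intro n
  induction n with
  | zero =>
    intro a b hn
    rw [PySem.List.pyRange_one_eq_nil (by omega),
        PySem.List.pyRange_one_eq_nil (by omega)]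
    rfl
  | succ n ih =>
    intro a b hn
    rw [PySem.List.pyRange_one_cons (by omega)]
    simp only [List.filter_cons]
    by_cases hac : a < c
    · rw [if_pos (by simpa using hac), ih (a + 1) b (by omega),
          PySem.List.pyRange_one_cons (a := a) (b := min c b) (by omega)]
    · rw [if_neg (by simpa using hac), ih (a + 1) b (by omega),
          PySem.List.pyRange_one_eq_nil (by omega),
          PySem.List.pyRange_one_eq_nil (by omega)]

-- the emit scan (plus the final tail) appends exactly the uncovered part of [cur, b]
theorem pvEmit_eq {b : Int} (cov : List (Int × Int)) (m cur : Int) (out : List Int)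
    (h : pvOrd m cov) :
    (if (pvEmitGo b cur out cov).1 ≤ b
      then (pvEmitGo b cur out cov).2 ++ PySem.List.pyRange (pvEmitGo b cur out cov).1 (b + 1) 1
      else (pvEmitGo b cur out cov).2)
    = out ++ (PySem.List.pyRange cur (b + 1) 1).filter (fun j => !pvCovB cov j) := by
  induction cov generalizing m cur out with
  | nil =>
    simp only [pvEmitGo]
    have : (PySem.List.pyRange cur (b + 1) 1).filter (fun j => !pvCovB [] j)
        = PySem.List.pyRange cur (b + 1) 1 := by
      rw [List.filter_eq_self]; intro j _; simp [pvCovB]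
    rw [this]
    split_ifs with h1
    · rfl
    · rw [PySem.List.pyRange_one_eq_nil (by omega)]; simp
  | cons p t ih =>
    obtain ⟨lo, hi⟩ := p
    obtain ⟨h1, h2, h3⟩ := h
    by_cases hc1 : lo > b
    · -- break: nothing of [cur, b] is covered by (lo, hi) or anything after it
      have he : pvEmitGo b cur out ((lo, hi) :: t) = (cur, out) := by
        simp [pvEmitGo, hc1]
      rw [he]
      have hfil : (PySem.List.pyRange cur (b + 1) 1).filter (fun j => !pvCovB ((lo, hi) :: t) j)
          = PySem.List.pyRange cur (b + 1) 1 := by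
        rw [List.filter_eq_self]
        intro j hj
        have hj' := PySem.List.mem_pyRange_one.mp hj
        have ht := pvCov_low h3 (show j < hi + 2 by omega)
        simp only [pvCovB, List.any_cons] at ht ⊢
        rw [ht]
        simp; omega
      rw [hfil]
      split_ifs with h4
      · rfl
      · rw [PySem.List.pyRange_one_eq_nil (by omega)]; simp
    · by_cases hc2 : hi < cur
      · -- skip: the interval lies entirely below cur
        have he : pvEmitGo b cur out ((lo, hi) :: t) = pvEmitGo b cur out t := by
          simp [pvEmitGo, hc1, hc2]
        rw [he, ih (hi + 2) cur out h3]
        congr 1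
        apply List.filter_congr
        intro j hj
        have hj' := PySem.List.mem_pyRange_one.mp hj
        simp only [pvCovB, List.any_cons]
        have hd : decide (lo ≤ j ∧ j ≤ hi) = false := by simp; omega
        rw [hd]; simp
      · -- main: lo ≤ b and cur ≤ hi — emit [cur, lo), jump cur to hi + 1
        have he : pvEmitGo b cur out ((lo, hi) :: t)
            = pvEmitGo b (max cur (hi + 1))
                (if cur < lo then out ++ PySem.List.pyRange cur lo 1 else out) t := by
          simp [pvEmitGo, hc1, hc2]
        rw [he, ih (hi + 2) (max cur (hi + 1)) _ h3]
        by_cases hcb : cur ≤ b + 1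
        · have hq1 : cur ≤ min (hi + 1) (b + 1) := by omega
          have hq2 : min (hi + 1) (b + 1) ≤ b + 1 := by omega
          rw [PySem.List.pyRange_one_append cur (min (hi + 1) (b + 1)) (b + 1) hq1 hq2,
              List.filter_append]
          have hseg1 : (PySem.List.pyRange cur (min (hi + 1) (b + 1)) 1).filter
              (fun j => !pvCovB ((lo, hi) :: t) j) = PySem.List.pyRange cur lo 1 := by
            have hcg : (PySem.List.pyRange cur (min (hi + 1) (b + 1)) 1).filter
                (fun j => !pvCovB ((lo, hi) :: t) j)
              = (PySem.List.pyRange cur (min (hi + 1) (b + 1)) 1).filter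
                  (fun j => decide (j < lo)) := by
              apply List.filter_congr
              intro j hj
              have hj' := PySem.List.mem_pyRange_one.mp hj
              have ht := pvCov_low h3 (show j < hi + 2 by omega)
              simp only [pvCovB, List.any_cons] at ht ⊢
              rw [ht]
              cases hd : decide (j < lo) <;> simp at hd ⊢ <;> omega
            rw [hcg, pvFilter_lt lo _ cur (min (hi + 1) (b + 1)) rfl]
            congr 1
            omega
          rw [hseg1]
          have hseg2 : (PySem.List.pyRange (min (hi + 1) (b + 1)) (b + 1) 1).filter
              (fun j => !pvCovB ((lo, hi) :: t) j)
            = (PySem.List.pyRange (max cur (hi + 1)) (b + 1) 1).filter (fun j => !pvCovB t j) := by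
            have hrng : PySem.List.pyRange (min (hi + 1) (b + 1)) (b + 1) 1
                = PySem.List.pyRange (max cur (hi + 1)) (b + 1) 1 := by
              by_cases hh : hi + 1 ≤ b + 1
              · congr 1; omega
              · rw [PySem.List.pyRange_one_eq_nil (by omega),
                    PySem.List.pyRange_one_eq_nil (by omega)]
            rw [hrng]
            apply List.filter_congr
            intro j hj
            have hj' := PySem.List.mem_pyRange_one.mp hj
            simp only [pvCovB, List.any_cons]
            have hd : decide (lo ≤ j ∧ j ≤ hi) = false := by simp; omega
            rw [hd]; simp
          rw [hseg2]
          split_ifs with hcl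
          · simp [List.append_assoc]
          · rw [PySem.List.pyRange_one_eq_nil (by omega : lo ≤ cur)]
            simp
        · -- cur already beyond b: everything is empty
          rw [PySem.List.pyRange_one_eq_nil (by omega :
                (b + 1 : Int) ≤ max cur (hi + 1)),
              PySem.List.pyRange_one_eq_nil (by omega : (b + 1 : Int) ≤ cur)]
          rw [if_neg (by omega : ¬ cur < lo)]
          simp

-- one range step of B = A's one-range fold, and the covered-set invariant is preserved
theorem pvStep_eq (st : List Int × List (Int × Int)) (a b m : Int)
    (ho : pvOrd m st.2) (hinv : ∀ j, pvCovB st.2 j = decide (j ∈ st.1)) :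
    (pvStepRange st a b).1
        = st.1 ++ (PySem.List.pyRange a (b + 1) 1).filter (fun j => !decide (j ∈ st.1))
      ∧ ∃ m', pvOrd m' (pvStepRange st a b).2 ∧
          ∀ j, pvCovB (pvStepRange st a b).2 j = decide (j ∈ (pvStepRange st a b).1) := by
  by_cases hab : a > b
  · rw [pvStepRange, if_pos hab]
    refine ⟨?_, m, ho, hinv⟩
    rw [PySem.List.pyRange_one_eq_nil (by omega)]
    simp
  · have hout : (pvStepRange st a b).1
        = st.1 ++ (PySem.List.pyRange a (b + 1) 1).filter (fun j => !decide (j ∈ st.1)) := by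
      rw [pvStepRange, if_neg hab]
      simp only []
      rw [pvEmit_eq st.2 m a st.1 ho]
      congr 1
      apply List.filter_congr
      intro j _
      rw [hinv j]
    have hcov : (pvStepRange st a b).2 = pvMerge st.2 a b := by
      rw [pvStepRange, if_neg hab]
    obtain ⟨mo, mc⟩ := pvMerge_ok ho (by omega : a ≤ b)
    refine ⟨hout, min m a, by rw [hcov]; exact mo, fun j => ?_⟩
    rw [hcov, mc j, hinv j, hout]
    have hiff : ((j ∈ st.1) ∨ (a ≤ j ∧ j ≤ b)) ↔
        j ∈ st.1 ++ (PySem.List.pyRange a (b + 1) 1).filter (fun x => !decide (x ∈ st.1)) := by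
      rw [List.mem_append]
      constructor
      · rintro (hm | hr)
        · exact Or.inl hm
        · by_cases hm : j ∈ st.1
          · exact Or.inl hm
          · refine Or.inr (List.mem_filter.mpr ⟨PySem.List.mem_pyRange_one.mpr (by omega), ?_⟩)
            simp [hm]
      · rintro (hm | hr)
        · exact Or.inl hm
        · have hr2 := PySem.List.mem_pyRange_one.mp (List.mem_filter.mp hr).1
          exact Or.inr (by omega)
    rw [← decide_eq_decide.mpr hiff, Bool.decide_or]

-- the full folds agree, given the invariant
theorem pvMain (data : List (Int × (Int × Int) × (Int × Int))) :
    ∀ (st : List Int × List (Int × Int)) (m : Int),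
      pvOrd m st.2 → (∀ j, pvCovB st.2 j = decide (j ∈ st.1)) →
      data.foldl
        (fun indeces i =>
          (PySem.List.pyRange i.2.1.2 (i.2.2.2 + 1) 1).foldl
            (fun acc j => if j ∈ acc then acc else acc ++ [j])
            ((PySem.List.pyRange i.2.1.1 (i.2.2.1 + 1) 1).foldl
              (fun acc j => if j ∈ acc then acc else acc ++ [j]) indeces)) st.1
      = (data.foldl
          (fun st i => pvStepRange (pvStepRange st i.2.1.1 i.2.2.1) i.2.1.2 i.2.2.2) st).1 := by
  induction data with
  | nil => intro st m _ _; rfl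
  | cons i t ih =>
    intro st m ho hinv
    simp only [List.foldl_cons]
    obtain ⟨h1out, m1, h1o, h1inv⟩ := pvStep_eq st i.2.1.1 i.2.2.1 m ho hinv
    obtain ⟨h2out, m2, h2o, h2inv⟩ :=
      pvStep_eq (pvStepRange st i.2.1.1 i.2.2.1) i.2.1.2 i.2.2.2 m1 h1o h1inv
    have hA1 : (PySem.List.pyRange i.2.1.1 (i.2.2.1 + 1) 1).foldl
        (fun acc j => if j ∈ acc then acc else acc ++ [j]) st.1
        = (pvStepRange st i.2.1.1 i.2.2.1).1 := by
      rw [pvFoldA _ _ (PySem.List.nodup_pyRange_one _ _), h1out]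
    have hA2 : (PySem.List.pyRange i.2.1.2 (i.2.2.2 + 1) 1).foldl
        (fun acc j => if j ∈ acc then acc else acc ++ [j])
        ((pvStepRange st i.2.1.1 i.2.2.1).1)
        = (pvStepRange (pvStepRange st i.2.1.1 i.2.2.1) i.2.1.2 i.2.2.2).1 := by
      rw [pvFoldA _ _ (PySem.List.nodup_pyRange_one _ _), h2out]
    rw [hA1, hA2]
    exact ih _ m2 h2o h2inv

-- ===== VERDICT (by name: the statement is the Claim_ definition above) =====
theorem no_overlap_spec : Claim_equal_no_overlap := by
  intro data _
  unfold Spec_no_overlap no_overlap no_overlap_alt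
  exact pvMain data ([], []) 0 trivial (fun j => by simp [pvCovB])
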